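-- pv_equiv track=rewrite | github.com/Kensuke-Mitsuzawa/JapaneseTokenizers | JapaneseTokenizer/datamodels.py | __is_valid_pos
-- ===== SOURCE A (Python) =====
-- def __is_valid_pos(pos_tuple, valid_pos):
--     # type: (Tuple[text_type,...],List[Tuple[text_type,...]])->bool
--     """This function checks token's pos is with in POS set that user specified.
--     If token meets all conditions, Return True; else return False
--     """
--     def is_valid_pos(valid_pos_tuple):
--         # type: (Tuple[text_type,...])->bool
--         length_valid_pos_tuple = len(valid_pos_tuple)
--         if valid_pos_tuple == pos_tuple[:length_valid_pos_tuple]: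
--             return True
--         else:
--             return False
--
--     seq_bool_flags = [is_valid_pos(valid_pos_tuple) for valid_pos_tuple in valid_pos]
--
--     if True in set(seq_bool_flags):
--         return True
--     else:
--         return False
-- ===== SOURCE B (Python) =====
-- def __is_valid_pos(pos_tuple, valid_pos):
--     # Invert the traversal: index the candidates in a set once, then walk the
--     # prefixes of pos_tuple from shortest to longest (growing one token at a
--     # time), returning at the first prefix that is a candidate.  No prefix
--     # longer than the longest candidate can match, so the walk stops there.
--     candidates = set(valid_pos)
--     if not candidates:
--         return False
--     limit = len(max(candidates, key=len))
--     prefix = ()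
--     for token in pos_tuple[:limit]:
--         if prefix in candidates:
--             return True
--         prefix = prefix + (token,)
--     return prefix in candidates
-- ===== Notes on version B (the rewrite author's own statement) =====
-- stated objective: alternative
-- what changed: B inverts the traversal: it builds a hash set of the candidates once, then walks the prefixes of pos_tuple from shortest to longest (growing one token per iteration, early-returning at the first prefix found in the set, and stopping at the longest candidate length), instead of A's loop over candidates comparing each against its slice of pos_tuple.
import Mathlib
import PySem

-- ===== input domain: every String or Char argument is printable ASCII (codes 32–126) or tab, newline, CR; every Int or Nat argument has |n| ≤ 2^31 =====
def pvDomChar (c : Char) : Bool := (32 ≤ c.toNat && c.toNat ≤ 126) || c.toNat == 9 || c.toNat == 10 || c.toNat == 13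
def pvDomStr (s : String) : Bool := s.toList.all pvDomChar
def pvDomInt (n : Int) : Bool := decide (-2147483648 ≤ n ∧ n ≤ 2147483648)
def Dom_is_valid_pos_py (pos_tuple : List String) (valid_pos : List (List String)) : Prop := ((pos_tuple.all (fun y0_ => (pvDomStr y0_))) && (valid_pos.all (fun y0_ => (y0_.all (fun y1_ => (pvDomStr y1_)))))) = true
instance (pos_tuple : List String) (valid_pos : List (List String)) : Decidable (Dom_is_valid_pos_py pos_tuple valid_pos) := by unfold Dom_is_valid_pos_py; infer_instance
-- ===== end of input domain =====

-- B inverts the traversal: it indexes the candidates in a set once and walks the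
-- prefixes of pos_tuple shortest-to-longest with early exit, instead of A's
-- per-candidate slice comparisons (alternative decomposition, same cost).

-- ===== PORT A =====
def is_valid_pos_py (pos_tuple : List String) (valid_pos : List (List String)) : Bool :=
  -- inner helper is_valid_pos: compares the candidate with pos_tuple[:len(candidate)]
  let is_valid_pos := fun (valid_pos_tuple : List String) =>
    let length_valid_pos_tuple : Int := (valid_pos_tuple.length : Int)
    if valid_pos_tuple == PySem.List.slice pos_tuple none (some length_valid_pos_tuple)
    then true else false
  let seq_bool_flags := valid_pos.map is_valid_pos
  if (PySem.Set.ofList seq_bool_flags).contains true then true else false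

-- ===== PORT B =====
-- B's for-loop with early return: walk pos_tuple, extending the current prefix
def altLoop (candidates : PySem.Set (List String)) (prefix_ : List String) : List String → Bool
  | [] => candidates.contains prefix_                  -- final 'return prefix in candidates'
  | token :: rest =>
      if candidates.contains prefix_ then true         -- early 'return True'
      else altLoop candidates (prefix_ ++ [token]) rest

def is_valid_pos_py_alt (pos_tuple : List String) (valid_pos : List (List String)) : Bool :=
  let candidates := PySem.Set.ofList valid_pos
  -- 'if not candidates: return False' + 'max(candidates, key=len)' as one Option match
  match PySem.List.max? candidates (fun c => (c.length : Int)) with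
  | none => false
  | some longest =>
      let limit : Int := (longest.length : Int)
      altLoop candidates [] (PySem.List.slice pos_tuple none (some limit))

-- ===== PRECONDITION & SPEC =====
def Spec_is_valid_pos_py (pos_tuple : List String) (valid_pos : List (List String)) (out : Bool) : Prop := out = is_valid_pos_py_alt pos_tuple valid_pos
instance (pos_tuple : List String) (valid_pos : List (List String)) (out : Bool) : Decidable (Spec_is_valid_pos_py pos_tuple valid_pos out) := by unfold Spec_is_valid_pos_py; infer_instance

-- ===== CLAIM (what is proved, stated in full; the proofs are below) =====
def Claim_equal_is_valid_pos_py : Prop := ∀ (pos_tuple : List String) (valid_pos : List (List String)), Dom_is_valid_pos_py pos_tuple valid_pos → Spec_is_valid_pos_py pos_tuple valid_pos (is_valid_pos_py pos_tuple valid_pos)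

-- ===== LEMMAS AND PROOFS =====

-- A cast slice by a candidate's length is the corresponding take
theorem slice_len (pos_tuple : List String) (k : Nat) :
    PySem.List.slice pos_tuple none (some (k : Int)) = pos_tuple.take k :=
  PySem.List.slice_to_natCast pos_tuple k

-- A computes 'some candidate equals the corresponding-length prefix of pos_tuple'
theorem is_valid_pos_py_eq_any (pos_tuple : List String) (valid_pos : List (List String)) :
    is_valid_pos_py pos_tuple valid_pos
      = valid_pos.any (fun vp => vp == pos_tuple.take vp.length) := by
  unfold is_valid_pos_py
  simp only [slice_len]
  have hif : ∀ b : Bool, (if b then true else false) = b := by decide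
  simp only [hif]
  rw [Bool.eq_iff_iff]
  simp [PySem.Set.mem_ofList, List.mem_map, List.any_eq_true]

-- characterisation of B's loop: true iff some prefix of acc ++ l that extends acc is a candidate
theorem altLoop_iff (candidates : PySem.Set (List String)) (acc l : List String) :
    altLoop candidates acc l = true
      ↔ ∃ k ≤ l.length, candidates.contains (acc ++ l.take k) = true := by
  induction l generalizing acc with
  | nil =>
      simp [altLoop]
  | cons token rest ih =>
      simp only [altLoop]
      cases h : candidates.contains acc with
      | true =>
          simp only [h]
          refine iff_of_true (by simp) ⟨0, Nat.zero_le _, ?_⟩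
          simpa using h
      | false =>
          rw [if_neg (by simp [h]), ih]
          constructor
          · rintro ⟨k, hk, hc⟩
            exact ⟨k + 1, by simpa using hk, by simpa using hc⟩
          · rintro ⟨k, hk, hc⟩
            cases k with
            | zero =>
                rw [List.take_zero, List.append_nil] at hc
                rw [hc] at h; cases h
            | succ k => exact ⟨k, by simpa using hk, by simpa using hc⟩

theorem is_valid_pos_py_alt_eq_any (pos_tuple : List String) (valid_pos : List (List String)) :
    is_valid_pos_py_alt pos_tuple valid_pos
      = valid_pos.any (fun vp => vp == pos_tuple.take vp.length) := by
  unfold is_valid_pos_py_alt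
  dsimp only
  cases hm : PySem.List.max? (PySem.Set.ofList valid_pos) (fun c => (c.length : Int)) with
  | none =>
      have hempty : PySem.Set.ofList valid_pos = [] := (PySem.List.max?_eq_none_iff _ _).mp hm
      rw [Bool.eq_iff_iff]
      refine iff_of_false (by simp) ?_
      simp only [List.any_eq_true, beq_iff_eq]
      rintro ⟨vp, hvp, -⟩
      have : vp ∈ PySem.Set.ofList valid_pos := (PySem.Set.mem_ofList _ _).mpr hvp
      simp [hempty] at this
  | some longest =>
      dsimp only
      rw [slice_len, Bool.eq_iff_iff, altLoop_iff]
      simp only [List.nil_append, List.any_eq_true, beq_iff_eq,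
        PySem.Set.contains_iff, PySem.Set.mem_ofList, List.length_take]
      constructor
      · rintro ⟨k, hk, hmem⟩
        rw [List.take_take] at hmem
        refine ⟨pos_tuple.take (min k longest.length), hmem, ?_⟩
        rw [List.length_take]
        exact (List.take_eq_take_iff.mpr (by omega)).symm
      · rintro ⟨vp, hvp, heq⟩
        have hlen : vp.length ≤ pos_tuple.length := by
          have := congrArg List.length heq
          simp [List.length_take] at this; omega
        have hlim : vp.length ≤ longest.length := by
          have hmem : vp ∈ PySem.Set.ofList valid_pos := (PySem.Set.mem_ofList _ _).mpr hvp
          have := PySem.List.max?_isMax hm vp hmem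
          exact_mod_cast this
        refine ⟨vp.length, by omega, ?_⟩
        rw [List.take_take, min_eq_left hlim, ← heq]
        exact hvp

-- ===== VERDICT (by name: the statement is the Claim_ definition above) =====
theorem is_valid_pos_py_spec : Claim_equal_is_valid_pos_py := by
  intro pos_tuple valid_pos _
  unfold Spec_is_valid_pos_py
  rw [is_valid_pos_py_eq_any, is_valid_pos_py_alt_eq_any]
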